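-- pv_equiv track=rewrite | github.com/edt-yxz-zzd/python3_src | nn_ns/fileformat/pdf/PdfReader.py | mk_xref_entriess
-- ===== SOURCE A (Python) =====
-- def mk_xref_entriess(objID2offset, freelist):
--     # -> [(begin_objNum, [(int, int, '[fn]')])]
--     objNum2entry = {objNum: (offset, genNum, 'n')
--                     for (objNum, genNum), offset in objID2offset.items()}
--     objNum2free = {objNum: (nextObjNum, newGenNum, 'f')
--                     for objNum, (newGenNum, nextObjNum) in freelist.items()}
--     dups = set(objNum2entry) & set(objNum2free)
--     if dups:
--         raise Exception('objNum duplicates: {}'.format(dups))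
--     objNum2entry.update(objNum2free)
--     prev_objNum = -2
--     lsls = []
--     for objNum, entry in sorted(objNum2entry.items()):
--         if objNum != prev_objNum+1:
--             begin_objNum = objNum
--             ls = []
--             lsls.append((begin_objNum, ls))
--         ls.append(entry)
--         # bug: forgot increase prev_objNum
--         prev_objNum = objNum
--     return lsls
-- ===== SOURCE B (Python) =====
-- def mk_xref_entriess(objID2offset, freelist):
--     # -> [(begin_objNum, [(int, int, '[fn]')])]
--     objNum2entry = {objNum: (offset, genNum, 'n')
--                     for (objNum, genNum), offset in objID2offset.items()}
--     objNum2free = {objNum: (nextObjNum, newGenNum, 'f')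
--                     for objNum, (newGenNum, nextObjNum) in freelist.items()}
--     dups = objNum2entry.keys() & objNum2free.keys()
--     if dups:
--         raise Exception('objNum duplicates: {}'.format(dups))
--     merged = {**objNum2entry, **objNum2free}
--     # group by the derived key objNum - index: constant exactly on each maximal
--     # run of consecutive object numbers of the sorted items
--     groups = {}
--     for i, (objNum, entry) in enumerate(sorted(merged.items())):
--         begin, entries = groups.setdefault(objNum - i, (objNum, []))
--         entries.append(entry)
--     return list(groups.values())
-- ===== Notes on version B (the rewrite author's own statement) =====
-- stated objective: alternative
-- what changed: The running prev_objNum state loop that appends to a mutable last group is replaced by grouping the sorted items under the derived key objNum - index (constant exactly on each maximal consecutive run), collected into a dict via setdefault, returning its values.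
import Mathlib
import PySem

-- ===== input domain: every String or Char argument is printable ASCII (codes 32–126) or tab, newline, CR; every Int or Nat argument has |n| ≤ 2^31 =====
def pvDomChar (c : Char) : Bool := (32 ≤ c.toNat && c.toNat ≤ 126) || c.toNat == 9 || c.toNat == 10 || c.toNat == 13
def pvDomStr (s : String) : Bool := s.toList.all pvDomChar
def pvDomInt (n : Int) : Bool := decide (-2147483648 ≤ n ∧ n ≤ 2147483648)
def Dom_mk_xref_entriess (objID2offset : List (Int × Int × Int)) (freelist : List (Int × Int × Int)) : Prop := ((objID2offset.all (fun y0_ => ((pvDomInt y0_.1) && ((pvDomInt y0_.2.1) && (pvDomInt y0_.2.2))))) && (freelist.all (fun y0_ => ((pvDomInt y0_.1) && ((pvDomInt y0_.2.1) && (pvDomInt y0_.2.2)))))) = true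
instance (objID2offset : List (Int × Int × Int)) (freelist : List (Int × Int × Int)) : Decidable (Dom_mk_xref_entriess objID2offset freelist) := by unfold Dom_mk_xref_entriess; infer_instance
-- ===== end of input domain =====

-- B replaces A's running prev_objNum loop by grouping the sorted items under the
-- derived key objNum - index (alternative decomposition, same cost).
-- A mutates nothing observable; equivalence is about the return value.

-- ===== PORT A =====
-- models Python's `ls.append(entry)`, where `ls` aliases the entry list of the
-- LAST group appended to lsls; the [] case is unreachable under Pre_ (in Python
-- it is the NameError excluded there)
def pvAppendLast (lsls : List (Int × List (Int × Int × String))) (e : Int × Int × String) :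
    List (Int × List (Int × Int × String)) :=
  match lsls with
  | [] => []
  | [p] => [(p.1, p.2 ++ [e])]
  | p :: rest => p :: pvAppendLast rest e

-- one iteration of A's for-loop: state = (prev_objNum, lsls)
def pvStepA (s : Int × List (Int × List (Int × Int × String))) (x : Int × (Int × Int × String)) :
    Int × List (Int × List (Int × Int × String)) :=
  let lsls := if x.1 ≠ s.1 + 1 then s.2 ++ [(x.1, [])] else s.2
  (x.1, pvAppendLast lsls x.2)

-- dict keys are distinct ints, so Python's tuple comparison in `sorted(d.items())`
-- never inspects the second component: sorting by the first component is exact.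
-- A's duplicate check raises (excluded by Pre_), so it does not appear here.
def mk_xref_entriess (objID2offset : List (Int × Int × Int)) (freelist : List (Int × Int × Int)) : List (Int × (List (Int × Int × String))) :=
  let objNum2entry := objID2offset.foldl
    (fun d t => d.insert t.1 (t.2.2, t.2.1, "n")) (PySem.Dict.empty : PySem.Dict Int (Int × Int × String))
  let objNum2free := freelist.foldl
    (fun d t => d.insert t.1 (t.2.2, t.2.1, "f")) (PySem.Dict.empty : PySem.Dict Int (Int × Int × String))
  let merged := objNum2entry.update objNum2free.items
  ((PySem.List.sorted merged.items (fun p => p.1)).foldl pvStepA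
    ((-2 : Int), ([] : List (Int × List (Int × Int × String))))).2

-- ===== PORT B =====
-- one iteration of B's for-loop over enumerate(sorted items):
-- `groups.setdefault(objNum - i, (objNum, []))[1].append(entry)` is exactly
-- Dict.modify (objNum - i) with default (objNum, []) appending entry
def pvStepB (g : PySem.Dict Int (Int × List (Int × Int × String))) (p : Int × (Int × (Int × Int × String))) :
    PySem.Dict Int (Int × List (Int × Int × String)) :=
  g.modify (p.2.1 - p.1) (p.2.1, []) (fun q => (q.1, q.2 ++ [p.2.2]))

def mk_xref_entriess_alt (objID2offset : List (Int × Int × Int)) (freelist : List (Int × Int × Int)) : List (Int × (List (Int × Int × String))) :=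
  let objNum2entry := objID2offset.foldl
    (fun d t => d.insert t.1 (t.2.2, t.2.1, "n")) (PySem.Dict.empty : PySem.Dict Int (Int × Int × String))
  let objNum2free := freelist.foldl
    (fun d t => d.insert t.1 (t.2.2, t.2.1, "f")) (PySem.Dict.empty : PySem.Dict Int (Int × Int × String))
  let merged := objNum2entry.update objNum2free.items
  ((PySem.List.enumerate (PySem.List.sorted merged.items (fun p => p.1)) 0).foldl
    pvStepB (PySem.Dict.empty : PySem.Dict Int (Int × List (Int × Int × String)))).values

-- ===== PRECONDITION & SPEC =====
-- Pre_ excludes exactly the inputs where Python A raises: a shared objNum between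
-- the two dicts (explicit Exception), and the case where the smallest merged
-- objNum is -1 (NameError: `ls` used before assignment, since -1 = prev_objNum+1
-- on the first iteration).
def Pre_mk_xref_entriess (objID2offset : List (Int × Int × Int)) (freelist : List (Int × Int × Int)) : Prop :=
  (∀ x ∈ objID2offset, ∀ y ∈ freelist, x.1 ≠ y.1) ∧
  ¬ ((((-1 : Int) ∈ objID2offset.map (·.1)) ∨ ((-1 : Int) ∈ freelist.map (·.1))) ∧
     (∀ k ∈ objID2offset.map (·.1), (-1 : Int) ≤ k) ∧ (∀ k ∈ freelist.map (·.1), (-1 : Int) ≤ k))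
instance (objID2offset : List (Int × Int × Int)) (freelist : List (Int × Int × Int)) : Decidable (Pre_mk_xref_entriess objID2offset freelist) := by unfold Pre_mk_xref_entriess; infer_instance

def pvWitness_mk_xref_entriess : (List (Int × Int × Int)) × (List (Int × Int × Int)) :=
  ([(1, 0, 10), (2, 0, 25)], [(0, 65535, 3)])

def Spec_mk_xref_entriess (objID2offset : List (Int × Int × Int)) (freelist : List (Int × Int × Int)) (out : List (Int × (List (Int × Int × String)))) : Prop := out = mk_xref_entriess_alt objID2offset freelist
instance (objID2offset : List (Int × Int × Int)) (freelist : List (Int × Int × Int)) (out : List (Int × (List (Int × Int × String)))) : Decidable (Spec_mk_xref_entriess objID2offset freelist out) := by unfold Spec_mk_xref_entriess; infer_instance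

-- ===== CLAIM (what is proved, stated in full; the proofs are below) =====
def Claim_equal_mk_xref_entriess : Prop := ∀ (objID2offset : List (Int × Int × Int)) (freelist : List (Int × Int × Int)), Dom_mk_xref_entriess objID2offset freelist → Pre_mk_xref_entriess objID2offset freelist → Spec_mk_xref_entriess objID2offset freelist (mk_xref_entriess objID2offset freelist)

-- ===== LEMMAS AND PROOFS =====

-- the merged dict both ports build (same Python code on both sides)
def pvMerged (objID2offset : List (Int × Int × Int)) (freelist : List (Int × Int × Int)) :
    PySem.Dict Int (Int × Int × String) :=
  (objID2offset.foldl
    (fun d t => d.insert t.1 (t.2.2, t.2.1, "n")) (PySem.Dict.empty : PySem.Dict Int (Int × Int × String))).update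
  (freelist.foldl
    (fun d t => d.insert t.1 (t.2.2, t.2.1, "f")) (PySem.Dict.empty : PySem.Dict Int (Int × Int × String))).items

theorem pvAppendLast_append (ys : List (Int × List (Int × Int × String))) (b : Int)
    (g : List (Int × Int × String)) (e : Int × Int × String) :
    pvAppendLast (ys ++ [(b, g)]) e = ys ++ [(b, g ++ [e])] := by
  induction ys with
  | nil => rfl
  | cons y ys ih =>
    cases ys with
    | nil => rfl
    | cons z zs =>
      simp only [List.cons_append, pvAppendLast]
      simp only [List.cons_append] at ih
      rw [ih]

theorem pvAppendLast_append2 (ys : List (Int × List (Int × Int × String))) (b : Int)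
    (g : List (Int × Int × String)) (c : Int) (h : List (Int × Int × String))
    (e : Int × Int × String) :
    pvAppendLast (ys ++ [(b, g), (c, h)]) e = ys ++ [(b, g), (c, h ++ [e])] := by
  have := pvAppendLast_append (ys ++ [(b, g)]) c h e
  simpa using this

theorem pv_find_last {α : Type} (init : List (Int × α)) (k : Int) (v : α)
    (h : ∀ p ∈ init, p.1 ≠ k) :
    List.find? (fun p => p.1 == k) (init ++ [(k, v)]) = some (k, v) := by
  induction init with
  | nil => simp
  | cons p l ih =>
    rw [List.cons_append, List.find?_cons_of_neg]
    · exact ih (fun q hq => h q (List.mem_cons_of_mem _ hq))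
    · simp [h p (by simp)]

theorem pvStepB_fresh (l : List (Int × (Int × List (Int × Int × String)))) (i : Int)
    (x : Int × (Int × Int × String)) (h : ∀ p ∈ l, p.1 ≠ x.1 - i) :
    pvStepB (PySem.Dict.mk l) (i, x) = PySem.Dict.mk (l ++ [(x.1 - i, (x.1, [x.2]))]) := by
  have hc : (PySem.Dict.mk l).contains (x.1 - i) = false := by
    simp only [PySem.Dict.contains, List.any_eq_false]
    intro p hp
    simpa using h p hp
  have hg : (PySem.Dict.mk l).getD (x.1 - i) ((x.1, [])) = (x.1, []) :=
    PySem.Dict.getD_of_not_contains _ _ hc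
  apply PySem.Dict.ext
  simp only [pvStepB, PySem.Dict.modify, hg]
  rw [PySem.Dict.items_insert_of_not_contains _ _ hc]
  simp

theorem pvStepB_last (init : List (Int × (Int × List (Int × Int × String)))) (b : Int)
    (g : List (Int × Int × String)) (i : Int) (x : Int × (Int × Int × String))
    (h : ∀ p ∈ init, p.1 ≠ x.1 - i) :
    pvStepB (PySem.Dict.mk (init ++ [(x.1 - i, (b, g))])) (i, x)
      = PySem.Dict.mk (init ++ [(x.1 - i, (b, g ++ [x.2]))]) := by
  have hc : (PySem.Dict.mk (init ++ [(x.1 - i, (b, g))])).contains (x.1 - i) = true := by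
    simp [PySem.Dict.contains]
  have hg : (PySem.Dict.mk (init ++ [(x.1 - i, (b, g))])).getD (x.1 - i) ((x.1, [])) = (b, g) := by
    simp only [PySem.Dict.getD, PySem.Dict.get?]
    rw [pv_find_last _ _ _ h]
    rfl
  apply PySem.Dict.ext
  simp only [pvStepB, PySem.Dict.modify, hg]
  rw [PySem.Dict.items_insert_of_contains _ _ hc]
  rw [List.map_append]
  have hinit : ∀ p ∈ init,
      (if (p.1 == x.1 - i) = true then (x.1 - i, (b, g ++ [x.2])) else p) = p := by
    intro p hp
    simp [h p hp]
  rw [List.map_congr_left hinit]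
  simp

theorem pv_loop (xs : List (Int × (Int × Int × String))) :
    ∀ (i prev : Int) (init : List (Int × (Int × List (Int × Int × String)))) (b : Int)
      (g : List (Int × Int × String)),
    xs.Pairwise (fun a b => a.1 < b.1) →
    (∀ x ∈ xs, prev < x.1) →
    (∀ p ∈ init, p.1 < prev - i + 1) →
    ((PySem.List.enumerate xs i).foldl pvStepB
        (PySem.Dict.mk (init ++ [(prev - i + 1, (b, g))]))).values
      = (xs.foldl pvStepA (prev, (init ++ [(prev - i + 1, (b, g))]).map (·.2))).2 := by
  induction xs with
  | nil =>
    intro i prev init b g _ _ _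
    simp [PySem.List.enumerate_nil, PySem.Dict.values]
  | cons x xs ih =>
    intro i prev init b g hpw hlt hinit
    have hx : prev < x.1 := hlt x (by simp)
    obtain ⟨hhead, htail⟩ := List.pairwise_cons.mp hpw
    rw [PySem.List.enumerate_cons, List.foldl_cons, List.foldl_cons]
    by_cases hxe : x.1 = prev + 1
    · -- continuing the current run
      have hkey : prev - i + 1 = x.1 - i := by omega
      have hinit' : ∀ p ∈ init, p.1 ≠ x.1 - i := by
        intro p hp
        have := hinit p hp
        omega
      rw [hkey, pvStepB_last init b g i x hinit']
      have hA : pvStepA (prev, (init ++ [(x.1 - i, (b, g))]).map (·.2)) x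
          = (x.1, (init ++ [(x.1 - i, (b, g ++ [x.2]))]).map (·.2)) := by
        simp [pvStepA, hxe, pvAppendLast_append]
      rw [hA]
      have hkey2 : x.1 - i = x.1 - (i + 1) + 1 := by ring
      rw [hkey2]
      exact ih (i + 1) x.1 init b (g ++ [x.2]) htail hhead
        (fun p hp => by have := hinit p hp; omega)
    · -- a new run begins
      have hgt : prev + 1 < x.1 := by
        rcases lt_or_ge (prev + 1) x.1 with h' | h'
        · exact h'
        · omega
      have hfresh : ∀ p ∈ init ++ [(prev - i + 1, (b, g))], p.1 ≠ x.1 - i := by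
        intro p hp
        rcases List.mem_append.mp hp with h' | h'
        · have := hinit p h'
          omega
        · have : p = (prev - i + 1, (b, g)) := by simpa using h'
          rw [this]
          dsimp only
          omega
      rw [pvStepB_fresh _ i x hfresh]
      have hA : pvStepA (prev, (init ++ [(prev - i + 1, (b, g))]).map (·.2)) x
          = (x.1, ((init ++ [(prev - i + 1, (b, g))]) ++ [(x.1 - i, (x.1, [x.2]))]).map (·.2)) := by
        simp [pvStepA, hxe, pvAppendLast_append2]
      rw [hA]
      have hkey2 : x.1 - i = x.1 - (i + 1) + 1 := by ring
      rw [hkey2]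
      exact ih (i + 1) x.1 (init ++ [(prev - i + 1, (b, g))]) x.1 [x.2] htail hhead
        (by
          intro p hp
          rcases List.mem_append.mp hp with h' | h'
          · have := hinit p h'
            omega
          · have : p = (prev - i + 1, (b, g)) := by simpa using h'
            rw [this]
            dsimp only
            omega)

theorem pv_mem_keys_gen (o : List (Int × Int × Int)) (s : String) :
    ∀ (d : PySem.Dict Int (Int × Int × String)) (k : Int),
    k ∈ (o.foldl (fun d t => d.insert t.1 (t.2.2, t.2.1, s)) d).keys ↔
      k ∈ d.keys ∨ k ∈ o.map (·.1) := by
  induction o with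
  | nil =>
    intro d k
    simp
  | cons t l ih =>
    intro d k
    rw [List.foldl_cons, ih]
    simp [PySem.Dict.mem_keys_insert]
    tauto

theorem pv_mem_keys_upd {ν : Type} (l : List (Int × ν)) :
    ∀ (d : PySem.Dict Int ν) (k : Int),
    k ∈ (PySem.Dict.update d l).keys ↔ k ∈ d.keys ∨ k ∈ l.map (·.1) := by
  unfold PySem.Dict.update
  induction l with
  | nil =>
    intro d k
    simp
  | cons p l ih =>
    intro d k
    rw [List.foldl_cons, ih]
    simp [PySem.Dict.mem_keys_insert]
    tauto

theorem pv_mem_keys (objID2offset : List (Int × Int × Int)) (freelist : List (Int × Int × Int)) (k : Int) :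
    k ∈ (pvMerged objID2offset freelist).keys ↔
      k ∈ objID2offset.map (·.1) ∨ k ∈ freelist.map (·.1) := by
  unfold pvMerged
  rw [pv_mem_keys_upd, pv_mem_keys_gen]
  have hf : ∀ (d : PySem.Dict Int (Int × Int × String)), d.items.map (·.1) = d.keys :=
    fun d => rfl
  rw [hf, pv_mem_keys_gen]
  simp [PySem.Dict.keys_empty]

theorem pv_nodup_keys_gen (o : List (Int × Int × Int)) (s : String) :
    ∀ (d : PySem.Dict Int (Int × Int × String)), d.keys.Nodup →
    (o.foldl (fun d t => d.insert t.1 (t.2.2, t.2.1, s)) d).keys.Nodup := by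
  induction o with
  | nil =>
    intro d h
    exact h
  | cons t l ih =>
    intro d h
    rw [List.foldl_cons]
    exact ih _ (PySem.Dict.nodup_keys_insert _ _ _ h)

theorem pv_nodup_keys (objID2offset : List (Int × Int × Int)) (freelist : List (Int × Int × Int)) :
    (pvMerged objID2offset freelist).keys.Nodup := by
  unfold pvMerged
  apply PySem.Dict.nodup_keys_update
  apply pv_nodup_keys_gen
  rw [PySem.Dict.keys_empty]
  exact List.nodup_nil

theorem mk_xref_entriess_spec : Claim_equal_mk_xref_entriess := by
  intro o f _ hpre
  show mk_xref_entriess o f = mk_xref_entriess_alt o f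
  have hA : mk_xref_entriess o f
      = ((PySem.List.sorted (pvMerged o f).items (fun p => p.1)).foldl pvStepA
          ((-2 : Int), ([] : List (Int × List (Int × Int × String))))).2 := rfl
  have hB : mk_xref_entriess_alt o f
      = ((PySem.List.enumerate (PySem.List.sorted (pvMerged o f).items (fun p => p.1)) 0).foldl
          pvStepB (PySem.Dict.empty : PySem.Dict Int (Int × List (Int × Int × String)))).values := rfl
  rw [hA, hB]
  have hperm : (PySem.List.sorted (pvMerged o f).items (fun p => p.1)).Perm (pvMerged o f).items :=
    PySem.List.sorted_perm _ _ _
  have hndsx : ((PySem.List.sorted (pvMerged o f).items (fun p => p.1)).map (·.1)).Nodup := by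
    have hkeys : (pvMerged o f).items.map (·.1) = (pvMerged o f).keys := rfl
    exact ((hperm.map (·.1)).nodup_iff).mpr (by rw [hkeys]; exact pv_nodup_keys o f)
  have hpl : (PySem.List.sorted (pvMerged o f).items (fun p => p.1)).Pairwise
      (fun a b => a.1 < b.1) := by
    have h1 := PySem.List.sorted_pairwise (pvMerged o f).items (fun p => p.1)
    have h2 : (PySem.List.sorted (pvMerged o f).items (fun p => p.1)).Pairwise
        (fun a b => a.1 ≠ b.1) := List.pairwise_map.mp hndsx
    exact (h1.and h2).imp (fun h => lt_of_le_of_ne h.1 h.2)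
  rcases hsx : PySem.List.sorted (pvMerged o f).items (fun p => p.1) with _ | ⟨x, rest⟩
  · rfl
  · rw [hsx] at hpl
    obtain ⟨hhead, htail⟩ := List.pairwise_cons.mp hpl
    have hmin : ∀ y ∈ (pvMerged o f).items, x.1 ≤ y.1 :=
      PySem.List.key_head_sorted_le (pvMerged o f).items (fun p => p.1) hsx
    have hxmem : x ∈ (pvMerged o f).items := hperm.mem_iff.mp (by rw [hsx]; simp)
    have hne1 : x.1 ≠ -1 := by
      intro hm1
      apply hpre.2
      refine ⟨?_, ?_, ?_⟩
      · have : x.1 ∈ (pvMerged o f).keys := List.mem_map.mpr ⟨x, hxmem, rfl⟩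
        rw [hm1] at this
        exact (pv_mem_keys o f (-1)).mp this
      · intro k hk
        have : k ∈ (pvMerged o f).keys := (pv_mem_keys o f k).mpr (Or.inl hk)
        obtain ⟨p, hp, hpk⟩ := List.mem_map.mp this
        rw [← hpk, ← hm1]
        exact hmin p hp
      · intro k hk
        have : k ∈ (pvMerged o f).keys := (pv_mem_keys o f k).mpr (Or.inr hk)
        obtain ⟨p, hp, hpk⟩ := List.mem_map.mp this
        rw [← hpk, ← hm1]
        exact hmin p hp
    rw [PySem.List.enumerate_cons, List.foldl_cons, List.foldl_cons]
    have hB1 : pvStepB (PySem.Dict.empty : PySem.Dict Int (Int × List (Int × Int × String))) (0, x)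
        = PySem.Dict.mk ([] ++ [(x.1 - 0, (x.1, [x.2]))]) :=
      pvStepB_fresh [] 0 x (by simp)
    rw [hB1]
    have hA1 : pvStepA ((-2 : Int), ([] : List (Int × List (Int × Int × String)))) x
        = (x.1, [(x.1, [x.2])]) := by
      simp [pvStepA, hne1, pvAppendLast]
    rw [hA1]
    have hloop := pv_loop rest 1 x.1 [] x.1 [x.2] htail hhead (by simp)
    have hk1 : x.1 - 1 + 1 = x.1 - 0 := by ring
    rw [hk1] at hloop
    simpa using hloop.symm
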